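-- pv_equiv track=rewrite | github.com/ScottCTD/causality_data_generation | question_gen/validate_qa.py | validate_question_indices
-- ===== SOURCE A (Python) =====
-- from typing import Any, Dict, List, Tuple
--
-- def validate_question_indices(
--     group_indices: Dict[Tuple[Any, str], List[int]]
-- ) -> List[str]:
--     """
--     Validate that question_index_within_shot, when present, is dense and 0-based
--     for each (sim_id, question_type) group.
--     """
--     issues: List[str] = []
--     for (sim_id, q_type), idxs in group_indices.items():
--         if not idxs:
--             continue
--         uniq = sorted(set(idxs))
--         expected = list(range(len(uniq)))
--         if uniq != expected:
--             issues.append(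
--                 f"sim_id={sim_id}, question_type={q_type!r}: "
--                 f"question_index_within_shot values {uniq} not equal to {expected}"
--             )
--     return issues
-- ===== SOURCE B (Python) =====
-- from typing import Any, Dict, List, Optional, Tuple
--
-- def _group_issue(sim_id: Any, q_type: str, idxs: List[int]) -> Optional[str]:
--     if not idxs:
--         return None
--     n = len(set(idxs))
--     # n distinct values are exactly {0,...,n-1} iff every value lies in [0, n)
--     if all(0 <= x < n for x in idxs):
--         return None
--     uniq = sorted(set(idxs))
--     expected = list(range(n))
--     return (
--         f"sim_id={sim_id}, question_type={q_type!r}: "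
--         f"question_index_within_shot values {uniq} not equal to {expected}"
--     )
--
-- def validate_question_indices(
--     group_indices: Dict[Tuple[Any, str], List[int]]
-- ) -> List[str]:
--     return [m for (sim_id, q_type), idxs in group_indices.items()
--             if (m := _group_issue(sim_id, q_type, idxs)) is not None]
-- ===== Notes on version B (the rewrite author's own statement) =====
-- stated objective: alternative
-- what changed: Per-group validity is decided by a pigeonhole bound test (all values lie in [0, n) where n = number of distinct values) instead of building sorted(set) and comparing it element-wise to range(n), and the result is assembled by a comprehension over an Option-returning helper instead of an accumulator loop; sorting happens only when a failure message is emitted.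
import Mathlib
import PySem

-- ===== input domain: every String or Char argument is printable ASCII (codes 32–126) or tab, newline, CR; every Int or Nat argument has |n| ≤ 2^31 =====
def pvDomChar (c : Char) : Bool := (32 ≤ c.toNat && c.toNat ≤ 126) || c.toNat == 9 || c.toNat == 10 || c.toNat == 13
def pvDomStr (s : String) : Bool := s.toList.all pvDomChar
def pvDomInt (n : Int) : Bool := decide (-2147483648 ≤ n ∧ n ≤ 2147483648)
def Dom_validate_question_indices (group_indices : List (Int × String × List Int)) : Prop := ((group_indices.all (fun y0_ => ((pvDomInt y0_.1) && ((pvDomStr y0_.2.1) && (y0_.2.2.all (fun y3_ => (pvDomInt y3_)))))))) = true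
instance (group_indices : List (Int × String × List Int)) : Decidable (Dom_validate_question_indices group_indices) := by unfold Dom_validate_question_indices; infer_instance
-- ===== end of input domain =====

-- B replaces A's accumulator loop with "sorted(set) == range(len)" per group by a
-- comprehension over an Option-returning helper that decides validity with a pigeonhole
-- bound test (all values in [0, n)), sorting only to build a failure message
-- (objective: alternative).

-- Shared formatting helpers: both Pythons build the identical f-string
-- (exact on the printable-ASCII + tab/newline/CR domain).
-- Python's repr of one character under quote `q` (hand-ported; exact on the Dom charset).
def pvReprChar (q : Char) (c : Char) : List Char :=
  if c = '\\' then ['\\', '\\']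
  else if c = q then ['\\', q]
  else if c = '\t' then ['\\', 't']
  else if c = '\n' then ['\\', 'n']
  else if c = '\r' then ['\\', 'r']
  else [c]

-- Python's repr of a str (hand-ported: double quotes iff the string has ' and no ").
def pvReprStr (s : String) : String :=
  let cs := s.toList
  let q : Char := if '\'' ∈ cs ∧ '"' ∉ cs then '"' else '\''
  String.ofList ([q] ++ (cs.flatMap (pvReprChar q)) ++ [q])

-- Python's str of a list of ints: "[a, b, …]".
def pvReprIntList (xs : List Int) : String :=
  "[" ++ PySem.Str.join ", " (xs.map PySem.Int.toStr) ++ "]"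

def pvMkIssue (sim_id : Int) (q_type : String) (uniq expected : List Int) : String :=
  "sim_id=" ++ PySem.Int.toStr sim_id ++ ", question_type=" ++ pvReprStr q_type ++
  ": question_index_within_shot values " ++ pvReprIntList uniq ++
  " not equal to " ++ pvReprIntList expected

-- ===== PORT A =====
def validate_question_indices (group_indices : List (Int × String × List Int)) : List String :=
  group_indices.foldl (fun issues g =>
    let sim_id := g.1
    let q_type := g.2.1
    let idxs := g.2.2
    if idxs = [] then issues
    else
      let uniq := PySem.List.sorted (PySem.Set.ofList idxs) (fun x => x) false
      let expected := PySem.List.pyRange 0 (uniq.length : Int) 1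
      if uniq ≠ expected then issues ++ [pvMkIssue sim_id q_type uniq expected]
      else issues) []

-- ===== PORT B =====
-- helper `_group_issue` from Source B: Option-returning validity check per group
def pvGroupIssue (sim_id : Int) (q_type : String) (idxs : List Int) : Option String :=
  if idxs = [] then none
  else
    let n := (PySem.Set.ofList idxs).length
    if idxs.all (fun x => decide (0 ≤ x) && decide (x < (n : Int))) then none
    else
      let uniq := PySem.List.sorted (PySem.Set.ofList idxs) (fun x => x) false
      let expected := PySem.List.pyRange 0 (n : Int) 1
      some (pvMkIssue sim_id q_type uniq expected)

def validate_question_indices_alt (group_indices : List (Int × String × List Int)) : List String :=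
  group_indices.filterMap (fun g => pvGroupIssue g.1 g.2.1 g.2.2)

-- ===== PRECONDITION & SPEC =====
def Spec_validate_question_indices (group_indices : List (Int × String × List Int)) (out : List String) : Prop := out = validate_question_indices_alt group_indices
instance (group_indices : List (Int × String × List Int)) (out : List String) : Decidable (Spec_validate_question_indices group_indices out) := by unfold Spec_validate_question_indices; infer_instance

-- ===== CLAIM (what is proved, stated in full; the proofs are below) =====
def Claim_equal_validate_question_indices : Prop := ∀ (group_indices : List (Int × String × List Int)), Dom_validate_question_indices group_indices → Spec_validate_question_indices group_indices (validate_question_indices group_indices)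

-- ===== LEMMAS AND PROOFS =====

-- the sorted distinct values are 0..n-1 iff every value lies in [0, n) (pigeonhole)
theorem pv_dense_iff (idxs : List Int) (hne : idxs ≠ []) :
    (PySem.List.sorted (PySem.Set.ofList idxs) (fun x => x) false
        = PySem.List.pyRange 0 ((PySem.Set.ofList idxs).length : Int) 1)
    ↔ (idxs.all (fun x => decide (0 ≤ x) &&
        decide (x < (((PySem.Set.ofList idxs).length : Nat) : Int))) = true) := by
  set s := PySem.Set.ofList idxs with hs
  set uniq := PySem.List.sorted s (fun x => x) false with hu
  have hperm : uniq.Perm s := PySem.List.sorted_perm ..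
  have hmem : ∀ x : Int, x ∈ uniq ↔ x ∈ idxs := by
    intro x; rw [hperm.mem_iff, hs, PySem.Set.mem_ofList]
  have hlen : uniq.length = s.length := PySem.List.length_sorted ..
  have hpw : uniq.Pairwise (fun a b => a < b) := PySem.List.sorted_ofList_pairwise_lt ..
  have hgl : ∀ i j, (hi : i < uniq.length) → (hj : j < uniq.length) → i < j → uniq[i] < uniq[j] :=
    List.pairwise_iff_getElem.mp hpw
  have hune : uniq ≠ [] := by
    obtain ⟨x, hx⟩ := List.exists_mem_of_ne_nil idxs hne
    exact List.ne_nil_of_mem ((hmem x).mpr hx)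
  have hnpos : 0 < uniq.length := List.length_pos_iff.mpr hune
  -- gap growth along the sorted distinct list
  have hgap : ∀ d i, (h : i + d < uniq.length) →
      uniq[i]'(by omega) + (d : Int) ≤ uniq[i + d]'h := by
    intro d
    induction d with
    | zero => intro i h; simp
    | succ d ih =>
        intro i h
        have h1 : i + d < uniq.length := by omega
        have h2 := ih i h1
        have h3 : uniq[i + d]'h1 < uniq[i + d + 1]'(by omega) := hgl _ _ h1 (by omega) (by omega)
        have h4 : uniq[i + (d + 1)]'h = uniq[i + d + 1]'(by omega) := rfl
        rw [h4]
        push_cast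
        omega
  rw [List.all_eq_true]
  constructor
  · intro heq x hx
    have hxm := (hmem x).mpr hx
    rw [heq] at hxm
    have := (PySem.List.mem_pyRange_one).mp hxm
    simp only [Bool.and_eq_true, decide_eq_true_eq]
    omega
  · intro hall
    have hbound : ∀ x ∈ uniq, 0 ≤ x ∧ x < (s.length : Int) := by
      intro x hx
      have := hall x ((hmem x).mp hx)
      simp only [Bool.and_eq_true, decide_eq_true_eq] at this
      omega
    apply List.ext_getElem
    · rw [hlen, PySem.List.length_pyRange_one]; omega
    · intro i hi hi2
      rw [PySem.List.getElem_pyRange_one]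
      have hlb : (i : Int) ≤ uniq[i] := by
        have hg := hgap i 0 (by omega)
        simp only [Nat.zero_add] at hg
        have h0 := (hbound _ (List.getElem_mem hnpos)).1
        omega
      have hub : uniq[i] ≤ (i : Int) := by
        have hg := hgap (uniq.length - 1 - i) i (by omega)
        have hud : i + (uniq.length - 1 - i) = uniq.length - 1 := by omega
        simp only [hud] at hg
        have hl := (hbound _ (List.getElem_mem (show uniq.length - 1 < uniq.length by omega))).2
        rw [← hlen] at hl
        have hc : ((uniq.length - 1 - i : Nat) : Int) = (uniq.length : Int) - 1 - i := by omega
        rw [hc] at hg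
        omega
      omega

-- A's loop step appends exactly B's optional message
theorem pv_step_eq (issues : List String) (g : Int × String × List Int) :
    (let sim_id := g.1
     let q_type := g.2.1
     let idxs := g.2.2
     if idxs = [] then issues
     else
       let uniq := PySem.List.sorted (PySem.Set.ofList idxs) (fun x => x) false
       let expected := PySem.List.pyRange 0 (uniq.length : Int) 1
       if uniq ≠ expected then issues ++ [pvMkIssue sim_id q_type uniq expected]
       else issues)
  = issues ++ (pvGroupIssue g.1 g.2.1 g.2.2).toList := by
  rcases g with ⟨sim_id, q_type, idxs⟩
  dsimp only
  unfold pvGroupIssue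
  by_cases h0 : idxs = []
  · simp [h0]
  · rw [if_neg h0, if_neg h0, PySem.List.length_sorted]
    rcases (pv_dense_iff idxs h0) with ⟨hfwd, hbwd⟩
    by_cases hc : idxs.all (fun x => decide (0 ≤ x) &&
        decide (x < (((PySem.Set.ofList idxs).length : Nat) : Int))) = true
    · rw [if_neg (fun hne => hne (hbwd hc))]
      simp [hc]
    · rw [if_pos (fun heq => hc (hfwd heq))]
      simp [hc]

theorem pv_foldl_filterMap {α : Type} (F : α → Option String) :
    ∀ (gs : List α) (acc : List String),
      gs.foldl (fun issues g => issues ++ (F g).toList) acc = acc ++ gs.filterMap F := by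
  intro gs
  induction gs with
  | nil => intro acc; simp
  | cons g gs ih =>
      intro acc
      simp only [List.foldl_cons, List.filterMap_cons, ih]
      cases F g <;> simp

-- ===== VERDICT (by name: the statement is the Claim_ definition above) =====
theorem validate_question_indices_spec : Claim_equal_validate_question_indices := by
  intro gs _
  unfold Spec_validate_question_indices validate_question_indices validate_question_indices_alt
  have hstep : (fun (issues : List String) (g : Int × String × List Int) =>
      let sim_id := g.1
      let q_type := g.2.1
      let idxs := g.2.2
      if idxs = [] then issues
      else
        let uniq := PySem.List.sorted (PySem.Set.ofList idxs) (fun x => x) false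
        let expected := PySem.List.pyRange 0 (uniq.length : Int) 1
        if uniq ≠ expected then issues ++ [pvMkIssue sim_id q_type uniq expected]
        else issues)
    = (fun (issues : List String) (g : Int × String × List Int) =>
        issues ++ (pvGroupIssue g.1 g.2.1 g.2.2).toList) :=
    funext fun issues => funext fun g => pv_step_eq issues g
  rw [hstep, pv_foldl_filterMap (fun g : Int × String × List Int => pvGroupIssue g.1 g.2.1 g.2.2) gs []]
  simp
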